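-- pv_equiv track=rewrite | github.com/Reidmcc/here-i-am | backend/app/services/session_helpers.py | build_memory_queries
-- ===== SOURCE A (Python) =====
-- from typing import Dict, List, Optional, Any, Callable, Tuple
--
-- def build_memory_queries(
--     conversation_context: List[Dict[str, str]],
--     current_message: Optional[str],
-- ) -> Tuple[Optional[str], Optional[str]]:
--     """
--     Build separate query texts for memory similarity search.
--
--     Returns separate queries for the user message and the most recent AI response,
--     allowing independent retrieval from each that can then be combined.
--
--     Args:
--         conversation_context: The conversation history
--         current_message: The current human message (can be None for continuations)
--
--     Returns:
--         Tuple of (user_query, assistant_query) - either can be None if not available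
--     """
--     # Find the most recent assistant message
--     last_assistant_content = None
--     for msg in reversed(conversation_context):
--         if msg.get("role") == "assistant":
--             last_assistant_content = msg.get("content", "")
--             break
--
--     # Handle continuation (no current message) - use last assistant message only
--     if not current_message:
--         if last_assistant_content:
--             return (None, last_assistant_content)
--         # Fallback to last user message if no assistant message
--         for msg in reversed(conversation_context):
--             if msg.get("role") == "user":
--                 return (msg.get("content", ""), None)
--         return (None, None)
--
--     # Return both queries separately
--     return (current_message, last_assistant_content)
-- ===== SOURCE B (Python) =====
-- def build_memory_queries(conversation_context, current_message):
--     # Single reversed pass: record the most recent assistant and user contents,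
--     # stopping as soon as both are known.
--     last_assistant = None
--     last_user = None
--     found_a = False
--     found_u = False
--     for msg in reversed(conversation_context):
--         role = msg.get("role")
--         if role == "assistant" and not found_a:
--             last_assistant = msg.get("content", "")
--             found_a = True
--         elif role == "user" and not found_u:
--             last_user = msg.get("content", "")
--             found_u = True
--         if found_a and found_u:
--             break
--     if not current_message:
--         if last_assistant:
--             return (None, last_assistant)
--         if found_u:
--             return (last_user, None)
--         return (None, None)
--     return (current_message, last_assistant)
-- ===== Notes on version B (the rewrite author's own statement) =====
-- stated objective: simpler
-- what changed: Replaces A's up-to-two reversed scans (one for the assistant message, a second fallback scan for the user message) with a single reversed pass that records both most-recent contents and breaks once both are found.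
import Mathlib
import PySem

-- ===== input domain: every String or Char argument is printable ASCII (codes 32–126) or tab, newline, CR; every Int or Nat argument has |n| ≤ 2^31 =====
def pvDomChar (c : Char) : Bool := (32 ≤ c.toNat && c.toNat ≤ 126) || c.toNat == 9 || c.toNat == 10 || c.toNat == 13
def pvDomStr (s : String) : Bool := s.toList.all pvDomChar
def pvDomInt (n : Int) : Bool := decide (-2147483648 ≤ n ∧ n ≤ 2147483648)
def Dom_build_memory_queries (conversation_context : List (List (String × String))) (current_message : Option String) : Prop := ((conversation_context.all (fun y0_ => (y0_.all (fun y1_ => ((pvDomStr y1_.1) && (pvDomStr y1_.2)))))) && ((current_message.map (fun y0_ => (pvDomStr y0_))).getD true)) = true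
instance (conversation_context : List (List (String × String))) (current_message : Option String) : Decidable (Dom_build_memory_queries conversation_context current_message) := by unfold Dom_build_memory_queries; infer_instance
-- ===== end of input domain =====

-- ===== PORT A =====
def pvFindAssistant : List (List (String × String)) → Option String
  | [] => none
  | m :: rest =>
      if PySem.Dict.get? (PySem.Dict.mk m) "role" = some "assistant" then
        some (PySem.Dict.getD (PySem.Dict.mk m) "content" "")
      else pvFindAssistant rest

def pvFindUser : List (List (String × String)) → Option String
  | [] => none
  | m :: rest =>
      if PySem.Dict.get? (PySem.Dict.mk m) "role" = some "user" then
        some (PySem.Dict.getD (PySem.Dict.mk m) "content" "")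
      else pvFindUser rest

-- A: one reversed scan for the last assistant message; on a falsy current_message a
-- second reversed scan for the last user message.
def build_memory_queries (conversation_context : List (List (String × String))) (current_message : Option String) : Option String × Option String :=
  let last_assistant := pvFindAssistant conversation_context.reverse
  if current_message = none ∨ current_message = some "" then
    if last_assistant.getD "" ≠ "" then (none, last_assistant)
    else
      match pvFindUser conversation_context.reverse with
      | some s => (some s, none)
      | none => (none, none)
  else (current_message, last_assistant)


-- ===== PORT B =====
-- B: ONE reversed pass recording the most recent assistant and user contents,
-- breaking once both are found (retained state: la, lu, found_a, found_u).
def pvScan : List (List (String × String)) → Option String → Option String → Bool → Bool → Option String × Option String × Bool × Bool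
  | [], la, lu, fa, fu => (la, lu, fa, fu)
  | m :: rest, la, lu, fa, fu =>
      let st : Option String × Option String × Bool × Bool :=
        if PySem.Dict.get? (PySem.Dict.mk m) "role" = some "assistant" ∧ fa = false then
          (some (PySem.Dict.getD (PySem.Dict.mk m) "content" ""), lu, true, fu)
        else if PySem.Dict.get? (PySem.Dict.mk m) "role" = some "user" ∧ fu = false then
          (la, some (PySem.Dict.getD (PySem.Dict.mk m) "content" ""), fa, true)
        else (la, lu, fa, fu)
      if st.2.2.1 = true ∧ st.2.2.2 = true then st
      else pvScan rest st.1 st.2.1 st.2.2.1 st.2.2.2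

def build_memory_queries_alt (conversation_context : List (List (String × String))) (current_message : Option String) : Option String × Option String :=
  let st := pvScan conversation_context.reverse none none false false
  let la := st.1
  let lu := st.2.1
  let fu := st.2.2.2
  if current_message = none ∨ current_message = some "" then
    if la.getD "" ≠ "" then (none, la)
    else if fu then (lu, none)
    else (none, none)
  else (current_message, la)


-- ===== PRECONDITION & SPEC =====
def Spec_build_memory_queries (conversation_context : List (List (String × String))) (current_message : Option String) (out : Option String × Option String) : Prop := out = build_memory_queries_alt conversation_context current_message
instance (conversation_context : List (List (String × String))) (current_message : Option String) (out : Option String × Option String) : Decidable (Spec_build_memory_queries conversation_context current_message out) := by unfold Spec_build_memory_queries; infer_instance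

-- ===== CLAIM (what is proved, stated in full; the proofs are below) =====
def Claim_equal_build_memory_queries : Prop := ∀ (conversation_context : List (List (String × String))) (current_message : Option String), Dom_build_memory_queries conversation_context current_message → Spec_build_memory_queries conversation_context current_message (build_memory_queries conversation_context current_message)

-- ===== LEMMAS AND PROOFS =====
-- Invariant of B's single-pass scan: the assistant slot is the first assistant hit
-- (if not already found), the user slot likewise; the break does not change the result.
theorem pvScan_inv (l : List (List (String × String))) : ∀ (la lu : Option String) (fa fu : Bool),
    pvScan l la lu fa fu =
      ((if fa then la else (pvFindAssistant l).elim la some),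
       (if fu then lu else (pvFindUser l).elim lu some),
       (fa || (pvFindAssistant l).isSome),
       (fu || (pvFindUser l).isSome)) := by
  induction l with
  | nil => intro la lu fa fu; cases fa <;> cases fu <;> simp [pvScan, pvFindAssistant, pvFindUser]
  | cons m rest ih =>
      intro la lu fa fu
      by_cases ha : PySem.Dict.get? (PySem.Dict.mk m) "role" = some "assistant" <;>
        by_cases hu : PySem.Dict.get? (PySem.Dict.mk m) "role" = some "user" <;>
          cases fa <;> cases fu <;>
            simp [pvScan, pvFindAssistant, pvFindUser, ha, hu, ih] <;>
              cases h1 : pvFindAssistant rest <;> cases h2 : pvFindUser rest <;> simp [h1, h2]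


-- ===== VERDICT (by name: the statement is the Claim_ definition above) =====
theorem build_memory_queries_spec : Claim_equal_build_memory_queries := by
  intro ctx cur _
  unfold Spec_build_memory_queries build_memory_queries build_memory_queries_alt
  rw [pvScan_inv]
  cases h1 : pvFindAssistant ctx.reverse <;> cases h2 : pvFindUser ctx.reverse <;> simp
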